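-- pv_equiv track=rewrite | github.com/alvcamar/practica_1_productor-consumidor | productor-consumidor.py | obtener_minimo
-- ===== SOURCE A (Python) =====
-- def obtener_minimo(lista):
--     """
--     Devuelve el elemento minimo de la lista de todos los valores que sean positivos
--     """
--     lst = []
--     for elem in lista:
--         if elem>=0:
--             lst.append(elem)
--     if lst:
--         return min(lst)
--     return
-- ===== SOURCE B (Python) =====
-- def obtener_minimo(lista):
--     """
--     Devuelve el elemento minimo de la lista de todos los valores que sean positivos
--     """
--     best = None
--     for elem in lista:
--         if elem >= 0:
--             if best is None or elem < best:
--                 best = elem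
--     return best
-- ===== Notes on version B (the rewrite author's own statement) =====
-- stated objective: simpler
-- what changed: Replaces A's two-pass build-a-filtered-list-then-min with a single pass keeping an Option best accumulator, no intermediate list.
import Mathlib
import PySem

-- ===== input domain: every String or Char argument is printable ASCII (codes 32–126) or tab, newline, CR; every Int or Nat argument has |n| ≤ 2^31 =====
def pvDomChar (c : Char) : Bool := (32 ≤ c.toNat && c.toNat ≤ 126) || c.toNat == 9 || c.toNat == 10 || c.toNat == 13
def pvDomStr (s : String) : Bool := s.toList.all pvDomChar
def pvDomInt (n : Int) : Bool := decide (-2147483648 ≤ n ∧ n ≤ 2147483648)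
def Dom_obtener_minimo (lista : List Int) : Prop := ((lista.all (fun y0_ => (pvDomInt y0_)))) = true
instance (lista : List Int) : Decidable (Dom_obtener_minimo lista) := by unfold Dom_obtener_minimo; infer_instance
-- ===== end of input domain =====

-- ===== PORT A =====
-- B: one accumulator pass instead of A's filter-then-min two passes; return value only, same values.
def obtener_minimo (lista : List Int) : Option Int :=
  let lst := lista.foldl (fun acc elem => if elem ≥ 0 then acc ++ [elem] else acc) []
  if lst ≠ [] then PySem.List.min? lst (fun x => x) else none

-- ===== PORT B =====
def obtener_minimo_alt (lista : List Int) : Option Int :=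
  lista.foldl (fun best elem =>
    if elem ≥ 0 then
      match best with
      | none => some elem
      | some b => if elem < b then some elem else best
    else best) none

-- ===== PRECONDITION & SPEC =====
def Spec_obtener_minimo (lista : List Int) (out : Option Int) : Prop := out = obtener_minimo_alt lista
instance (lista : List Int) (out : Option Int) : Decidable (Spec_obtener_minimo lista out) := by unfold Spec_obtener_minimo; infer_instance

-- ===== CLAIM (what is proved, stated in full; the proofs are below) =====
def Claim_equal_obtener_minimo : Prop := ∀ (lista : List Int), Dom_obtener_minimo lista → Spec_obtener_minimo lista (obtener_minimo lista)

-- ===== LEMMAS AND PROOFS =====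

-- ===== VERDICT (by name: the statement is the Claim_ definition above) =====
lemma minfold (lista acc : List Int) :
    (if (lista.foldl (fun a e => if e ≥ 0 then a ++ [e] else a) acc) ≠ [] then
       PySem.List.min? (lista.foldl (fun a e => if e ≥ 0 then a ++ [e] else a) acc) (fun x => x)
     else none)
    = lista.foldl (fun best elem =>
        if elem ≥ 0 then
          match best with
          | none => some elem
          | some b => if elem < b then some elem else best
        else best) (PySem.List.min? acc (fun x => x)) := by
  induction lista generalizing acc with
  | nil =>
    simp only [List.foldl]
    rcases acc with _ | ⟨x, t⟩
    · simp [PySem.List.min?]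
    · simp [PySem.List.min?_id_cons]
  | cons e rest ih =>
    simp only [List.foldl]
    by_cases he : e ≥ 0
    · simp only [he, if_pos]
      rw [ih]
      congr 1
      rcases acc with _ | ⟨x, t⟩
      · simp [PySem.List.min?]
      · simp only [PySem.List.min?_id_cons, List.cons_append, List.foldl_append, List.foldl]
        have : t.foldl min x ⊓ e = if e < t.foldl min x then e else t.foldl min x := by
          rcases lt_or_ge e (t.foldl min x) with h | h <;>
            · rw [min_def]; split_ifs <;> omega
        rw [this]
        split_ifs <;> rfl
    · rw [if_neg he, if_neg he]
      exact ih acc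

theorem obtener_minimo_spec : Claim_equal_obtener_minimo := by
  intro lista _
  unfold Spec_obtener_minimo obtener_minimo obtener_minimo_alt
  have h := minfold lista []
  simpa [PySem.List.min?] using h
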